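-- pv_equiv track=rewrite | github.com/pypi-data/pypi-mirror-331 | packages/pyutplugins/pyutplugins-3.2.6.tar.gz/pyutplugins-3.2.6/src/pyutplugins/ioplugins/java/JavaReader.py | __readParagraph
-- ===== SOURCE A (Python) =====
-- def __readParagraph(lstFile, currentPos, paragraphStart, paragraphStop):
--     """
--     Read a paragraph; Handle the sublevel;
--     Read a paragraph. A paragraph is limited by two specific tokens.
--     As a paragraph can include itself a paragraph, this function
--     does read sub-paragraphs.
--
--     @param lstFile : list of instructions read from the file to analyze
--     @param currentPos : current position in the list
--     @param paragraphStart : token which identify the beginning of the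
--                             paragraph
--     @param paragraphStop  : token which identify the end of the paragraph
--     @return end of paragraph position
--     @Author C.Dutoit
--     @since 1.1.2.5
--     """
--     # We must begin on the paragraph start token
--     if lstFile[currentPos] != paragraphStart:
--         return currentPos
--
--     # Init
--     level = 1
--
--     # Read paragraph
--     while level > 0:
--         currentPos += 1
--         if lstFile[currentPos] == paragraphStart:
--             level += 1
--         elif lstFile[currentPos] == paragraphStop:
--             level -= 1
--     return currentPos
-- ===== SOURCE B (Python) =====
-- def __readParagraph(lstFile, currentPos, paragraphStart, paragraphStop):
--     """Recursive descent: the stop token is the loop condition and each nested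
--     start token is skipped by a recursive call, so the call stack replaces A's
--     explicit depth counter."""
--     # We must begin on the paragraph start token
--     if lstFile[currentPos] != paragraphStart:
--         return currentPos
--     pos = currentPos + 1
--     while lstFile[pos] != paragraphStop:
--         if lstFile[pos] == paragraphStart:
--             # skip the whole nested paragraph by recursing on it
--             pos = __readParagraph(lstFile, pos, paragraphStart, paragraphStop)
--         pos += 1
--     return pos
-- ===== Notes on version B (the rewrite author's own statement) =====
-- stated objective: alternative
-- what changed: A's explicit level-counter while-loop is replaced by recursive descent: B's loop runs until the stop token, and on each nested start token it recurses to skip the whole sub-paragraph, so the call stack replaces the depth counter.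
import Mathlib
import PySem

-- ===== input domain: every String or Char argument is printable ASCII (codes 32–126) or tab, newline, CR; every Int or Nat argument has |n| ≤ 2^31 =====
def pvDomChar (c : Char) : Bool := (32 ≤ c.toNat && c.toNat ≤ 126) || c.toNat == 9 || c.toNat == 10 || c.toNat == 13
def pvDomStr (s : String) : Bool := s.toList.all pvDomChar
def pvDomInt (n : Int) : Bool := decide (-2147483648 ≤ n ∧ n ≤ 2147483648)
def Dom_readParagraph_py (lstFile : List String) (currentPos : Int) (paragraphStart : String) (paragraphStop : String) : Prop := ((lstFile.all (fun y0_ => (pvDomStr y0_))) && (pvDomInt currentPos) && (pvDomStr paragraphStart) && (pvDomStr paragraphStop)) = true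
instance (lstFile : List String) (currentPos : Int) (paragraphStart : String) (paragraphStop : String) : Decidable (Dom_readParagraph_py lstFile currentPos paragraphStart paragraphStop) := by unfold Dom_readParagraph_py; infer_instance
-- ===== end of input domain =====

-- B replaces A's explicit `level` depth counter by recursive descent (the loop runs until the
-- stop token and the call stack skips each nested paragraph): an alternative decomposition with
-- the same return value wherever A returns.

-- ===== PORT A =====
-- A's loop `while level > 0: currentPos += 1; …`; the Option result models the IndexError
-- Python raises when the scan runs past the list (none = exception; Pre_ excludes those inputs).
def loopA (lstFile : List String) (paragraphStart paragraphStop : String) :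
    Nat → Int → Int → Option Int
  | 0, _, _ => none
  | fuel + 1, pos, level =>
    if level > 0 then
      match PySem.List.pyGet? lstFile (pos + 1) with
      | none => none
      | some tok =>
        if tok = paragraphStart then loopA lstFile paragraphStart paragraphStop fuel (pos + 1) (level + 1)
        else if tok = paragraphStop then loopA lstFile paragraphStart paragraphStop fuel (pos + 1) (level - 1)
        else loopA lstFile paragraphStart paragraphStop fuel (pos + 1) level
    else some pos

def readParagraph_py (lstFile : List String) (currentPos : Int) (paragraphStart : String) (paragraphStop : String) : Int :=
  match PySem.List.pyGet? lstFile currentPos with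
  | none => currentPos  -- IndexError in Python (outside Pre_)
  | some tok =>
    if tok ≠ paragraphStart then currentPos
    else (loopA lstFile paragraphStart paragraphStop (2 * lstFile.length + 2) currentPos 1).getD currentPos

-- ===== PORT B =====
-- B's `while lstFile[pos] != paragraphStop` loop starting at `i`: the recursive call
-- `__readParagraph(lstFile, i, …)` is made where lstFile[i] == paragraphStart, so its guard
-- passes and it reduces to the scan from i + 1; B then continues one past its result.
-- `none` models the IndexError B's recursion runs into (outside Pre_).
def scanB (toks : List String) (opn cls : String) : Nat → Int → Option Int
  | 0, _ => none
  | gas + 1, i =>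
    (PySem.List.pyGet? toks i).bind fun w =>
      if w = cls then some i
      else if w = opn then
        (scanB toks opn cls gas (i + 1)).bind fun e => scanB toks opn cls gas (e + 1)
      else scanB toks opn cls gas (i + 1)

def readParagraph_py_alt (lstFile : List String) (currentPos : Int) (paragraphStart : String) (paragraphStop : String) : Int :=
  -- guard: must begin on the start token (an out-of-range currentPos is an IndexError, outside Pre_)
  if PySem.List.pyGet? lstFile currentPos = some paragraphStart then
    (scanB lstFile paragraphStart paragraphStop (2 * lstFile.length + 2) (currentPos + 1)).getD currentPos
  else currentPos

-- ===== PRECONDITION & SPEC =====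
-- +1 for a start token, -1 for a stop token (start checked first, as in A), else 0
def balTok (paragraphStart paragraphStop tok : String) : Int :=
  if tok = paragraphStart then 1 else if tok = paragraphStop then -1 else 0

-- sum of balTok over the k tokens lstFile[pos], lstFile[pos+1], …, lstFile[pos+k-1] (Python indexing)
def bsum (lstFile : List String) (paragraphStart paragraphStop : String) : Int → Nat → Int
  | _, 0 => 0
  | pos, k + 1 => balTok paragraphStart paragraphStop (PySem.List.pyGetD lstFile pos "") +
      bsum lstFile paragraphStart paragraphStop (pos + 1) k

-- Pre_ = exactly where Python A returns (no IndexError): currentPos is a valid (possibly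
-- negative) index, and if it holds the start token, the nesting balance of the following
-- tokens reaches -1 before the scan runs past the end of the list.
def Pre_readParagraph_py (lstFile : List String) (currentPos : Int) (paragraphStart : String) (paragraphStop : String) : Prop :=
  -(lstFile.length : Int) ≤ currentPos ∧ currentPos < (lstFile.length : Int) ∧
    (PySem.List.pyGetD lstFile currentPos "" ≠ paragraphStart ∨
      ∃ k : Nat, k < 2 * lstFile.length ∧ currentPos + k < (lstFile.length : Int) ∧
        1 + bsum lstFile paragraphStart paragraphStop (currentPos + 1) k = 0)
instance (lstFile : List String) (currentPos : Int) (paragraphStart : String) (paragraphStop : String) : Decidable (Pre_readParagraph_py lstFile currentPos paragraphStart paragraphStop) := by unfold Pre_readParagraph_py; infer_instance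

def pvWitness_readParagraph_py : List String × Int × String × String := (["{", "x", "}"], 0, "{", "}")

def Spec_readParagraph_py (lstFile : List String) (currentPos : Int) (paragraphStart : String) (paragraphStop : String) (out : Int) : Prop := out = readParagraph_py_alt lstFile currentPos paragraphStart paragraphStop
instance (lstFile : List String) (currentPos : Int) (paragraphStart : String) (paragraphStop : String) (out : Int) : Decidable (Spec_readParagraph_py lstFile currentPos paragraphStart paragraphStop out) := by unfold Spec_readParagraph_py; infer_instance

-- ===== CLAIM (what is proved, stated in full; the proofs are below) =====
def Claim_equal_readParagraph_py : Prop := ∀ (lstFile : List String) (currentPos : Int) (paragraphStart : String) (paragraphStop : String), Dom_readParagraph_py lstFile currentPos paragraphStart paragraphStop → Pre_readParagraph_py lstFile currentPos paragraphStart paragraphStop → Spec_readParagraph_py lstFile currentPos paragraphStart paragraphStop (readParagraph_py lstFile currentPos paragraphStart paragraphStop)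

-- ===== LEMMAS AND PROOFS =====
theorem balTok_bounds (s t tok : String) : -1 ≤ balTok s t tok ∧ balTok s t tok ≤ 1 := by
  unfold balTok; split_ifs <;> omega

theorem balTok_nonneg_of_eq (s tok : String) : 0 ≤ balTok s s tok := by
  unfold balTok; split_ifs <;> omega

-- with paragraphStart = paragraphStop every delta is ≥ 0, so the balance never reaches -1
theorem bsum_nonneg_of_eq (L : List String) (s : String) :
    ∀ (k : Nat) (pos : Int), 0 ≤ bsum L s s pos k := by
  intro k
  induction k with
  | zero => intro pos; simp [bsum]
  | succ k ih =>
    intro pos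
    have h1 := balTok_nonneg_of_eq s (PySem.List.pyGetD L pos "")
    have h2 := ih (pos + 1)
    rw [bsum]; omega

theorem bsum_succ_right (L : List String) (s t : String) (pos : Int) (k : Nat) :
    bsum L s t pos (k + 1) = bsum L s t pos k +
      balTok s t (PySem.List.pyGetD L (pos + k) "") := by
  induction k generalizing pos with
  | zero => simp [bsum]
  | succ k ihh =>
    have h0 : bsum L s t pos (k + 1 + 1) = balTok s t (PySem.List.pyGetD L pos "") + bsum L s t (pos+1) (k+1) := rfl
    rw [h0, ihh]
    show _ = balTok s t (PySem.List.pyGetD L pos "") + bsum L s t (pos+1) k + _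
    have h2 : pos + 1 + (k : Int) = pos + ((k:Nat)+1 : Nat) := by push_cast; ring
    rw [h2]; ring

theorem pyGet?_eq_some_pyGetD (xs : List String) (i : Int)
    (h1 : -(xs.length:Int) ≤ i) (h2 : i < xs.length) :
    PySem.List.pyGet? xs i = some (PySem.List.pyGetD xs i "") := by
  have h : ¬ PySem.List.pyGet? xs i = none := by
    rw [PySem.List.pyGet?_eq_none_iff]
    exact fun hn => hn ⟨h1, h2⟩
  cases hg : PySem.List.pyGet? xs i with
  | none => exact absurd hg h
  | some x => simp [PySem.List.pyGetD, hg]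

theorem bsum_cons (L : List String) (s t : String) (pos : Int) (k : Nat) :
    bsum L s t pos (k + 1) =
      balTok s t (PySem.List.pyGetD L pos "") + bsum L s t (pos + 1) k := rfl

theorem loopA_eq (L : List String) (s t : String) :
    ∀ (k fuel : Nat) (pos level : Int),
      k + 1 ≤ fuel →
      -(L.length : Int) - 1 ≤ pos → pos + k < (L.length : Int) →
      level + bsum L s t (pos + 1) k = 0 →
      (∀ m : Nat, m < k → 0 < level + bsum L s t (pos + 1) m) →
      loopA L s t fuel pos level = some (pos + k) := by
  intro k
  induction k with
  | zero =>
    intro fuel pos level hf _ _ h3 _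
    obtain ⟨f, rfl⟩ : ∃ f, fuel = f + 1 := ⟨fuel - 1, by omega⟩
    have hl : level = 0 := by simpa [bsum] using h3
    simp [loopA, hl]
  | succ k ih =>
    intro fuel pos level hf hlo hhi h3 h4
    obtain ⟨f, rfl⟩ : ∃ f, fuel = f + 1 := ⟨fuel - 1, by omega⟩
    have hpos : 0 < level := by simpa [bsum] using h4 0 (by omega)
    have hhi' : pos + 1 + (k : Int) < (L.length : Int) := by push_cast at hhi; omega
    have hget := pyGet?_eq_some_pyGetD L (pos + 1) (by omega) (by omega)
    set tok := PySem.List.pyGetD L (pos + 1) "" with htok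
    have hstep := bsum_cons L s t (pos + 1) k
    have hrec : ∀ lv : Int, lv = level + balTok s t tok →
        loopA L s t f (pos + 1) lv = some (pos + ((k:Nat) + 1 : Nat)) := by
      intro lv hlv
      have hres := ih f (pos + 1) lv (by omega) (by omega) hhi'
        (by have h3x := h3; rw [hstep] at h3x; rw [hlv, htok]; omega)
        (by intro m hm
            have h4' := h4 (m + 1) (by omega)
            rw [bsum_cons, ← htok] at h4'
            omega)
      rw [hres]
      congr 1
      push_cast
      ring
    simp only [loopA]
    rw [if_pos hpos, hget]
    dsimp only
    by_cases hs : tok = s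
    · rw [if_pos hs]
      exact hrec (level + 1) (by simp [balTok, hs])
    · rw [if_neg hs]
      by_cases ht : tok = t
      · rw [if_pos ht]
        have hts : ¬ (t = s) := ht ▸ hs
        exact hrec (level - 1) (by simp [balTok, ht, hts]; omega)
      · rw [if_neg ht]
        exact hrec level (by simp [balTok, hs, ht])

theorem bsum_add (L : List String) (s t : String) :
    ∀ (a b : Nat) (pos : Int),
      bsum L s t pos (a + b) = bsum L s t pos a + bsum L s t (pos + a) b := by
  intro a
  induction a with
  | zero => intro b pos; simp [bsum]
  | succ a ih =>
    intro b pos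
    have h1 : a + 1 + b = (a + b) + 1 := by omega
    rw [h1]
    rw [bsum_cons, bsum_cons, ih b (pos + 1)]
    have h2 : pos + 1 + (a : Int) = pos + ((a : Nat) + 1 : Nat) := by push_cast; ring
    rw [h2]
    ring

-- discrete intermediate value: a sequence that never drops by more than 1 and goes
-- from above v to at most v hits v
theorem ivt_down (g : Nat → Int) (hstep : ∀ m, g m - 1 ≤ g (m + 1)) :
    ∀ (d a : Nat) (v : Int), v < g a → g (a + d) ≤ v →
      ∃ i, a ≤ i ∧ i ≤ a + d ∧ g i = v := by
  intro d
  induction d with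
  | zero => intro a v h1 h2; simp at h2; omega
  | succ d ih =>
    intro a v h1 h2
    by_cases he : g (a + 1) = v
    · exact ⟨a + 1, by omega, by omega, he⟩
    · have hgt : v < g (a + 1) := by have := hstep a; omega
      have h2' : g ((a + 1) + d) ≤ v := by have : (a+1) + d = a + (d+1) := by omega
                                           rw [this]; exact h2
      obtain ⟨i, hi1, hi2, hi3⟩ := ih (a + 1) v hgt h2'
      exact ⟨i, by omega, by omega, hi3⟩

theorem scanB_eq (L : List String) (s t : String) (hst : s ≠ t) :
    ∀ (j fuel : Nat) (pos : Int),
      j + 1 ≤ fuel →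
      -(L.length : Int) ≤ pos → pos + j < (L.length : Int) →
      1 + bsum L s t pos (j + 1) = 0 →
      (∀ m : Nat, m ≤ j → 0 < 1 + bsum L s t pos m) →
      scanB L s t fuel pos = some (pos + j) := by
  intro j
  induction j using Nat.strong_induction_on with
  | _ j ih =>
  intro fuel pos hf hlo hhi h3 h4
  obtain ⟨f, rfl⟩ : ∃ f, fuel = f + 1 := ⟨fuel - 1, by omega⟩
  have hget := pyGet?_eq_some_pyGetD L pos hlo (by omega)
  set tok := PySem.List.pyGetD L pos "" with htok
  simp only [scanB]
  rw [hget]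
  dsimp only [Option.bind]
  by_cases ht : tok = t
  · -- closing token right here: the loop condition fails, return pos
    rw [if_pos ht]
    have hts : tok ≠ s := by rw [ht]; exact fun h => hst h.symm
    have hb1 : bsum L s t pos 1 = -1 := by
      rw [bsum_cons, ← htok, ht]
      simp [balTok, bsum, Ne.symm hst]
    have hj0 : j = 0 := by
      by_contra h
      have := h4 1 (by omega)
      rw [hb1] at this; omega
    subst hj0
    simp
  · rw [if_neg ht]
    by_cases hs : tok = s
    · -- nested paragraph: recurse on it, then continue after its end
      rw [if_pos hs]
      have hb1 : bsum L s t pos 1 = 1 := by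
        rw [bsum_cons, ← htok, hs]; simp [balTok, bsum]
      have hj1 : 1 ≤ j := by
        rcases Nat.eq_zero_or_pos j with h | h
        · subst h; rw [hb1] at h3; omega
        · omega
      -- the running level g m = 1 + bsum pos m falls from 2 (at m = 1) to 0 (at m = j+1)
      have hstep : ∀ m, (1 + bsum L s t pos m) - 1 ≤ 1 + bsum L s t pos (m + 1) := by
        intro m
        rw [bsum_succ_right]
        have := balTok_bounds s t (PySem.List.pyGetD L (pos + m) "")
        omega
      have hivt := ivt_down (fun m => 1 + bsum L s t pos m) hstep j 1 1
        (show (1:Int) < 1 + bsum L s t pos 1 by rw [hb1]; omega)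
        (show 1 + bsum L s t pos (1 + j) ≤ 1 by
          have h : 1 + j = j + 1 := by omega
          rw [h]; omega)
      have hQex : ∃ i, 1 + bsum L s t pos i = 1 ∧ 2 ≤ i ∧ i ≤ j + 1 := by
        obtain ⟨i, hi1, hi2, hi3⟩ := hivt
        have hi3' : 1 + bsum L s t pos i = 1 := hi3
        refine ⟨i, hi3', ?_, by omega⟩
        rcases Nat.lt_or_ge i 2 with h | h
        · interval_cases i
          · rw [hb1] at hi3'; omega
        · exact h
      classical
      set i0 := Nat.find hQex with hi0
      obtain ⟨hFi0, hi02, hi0j⟩ := Nat.find_spec hQex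
      rw [← hi0] at hFi0 hi02 hi0j
      have hmin : ∀ m, 2 ≤ m → m < i0 → 1 + bsum L s t pos m ≠ 1 := by
        intro m hm2 hmi
        have := Nat.find_min hQex hmi
        intro hFm
        exact this ⟨hFm, hm2, by omega⟩
      have hi0le : i0 ≤ j := by
        rcases Nat.lt_or_ge i0 (j + 1) with h | h
        · omega
        · exfalso
          have hij : i0 = j + 1 := by omega
          rw [hij] at hFi0; omega
      -- the nested call: minimal matching end at offset i0 - 2 from pos + 1
      have hFge2 : ∀ m, 1 ≤ m → m ≤ i0 - 1 → 2 ≤ 1 + bsum L s t pos m := by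
        intro m hm1 hmi
        rcases Nat.lt_or_ge m 2 with h | h
        · have : m = 1 := by omega
          rw [this, hb1]; omega
        · have hne := hmin m h (by omega)
          have hpos' := h4 m (by omega)
          omega
      have hshift : ∀ m : Nat, bsum L s t (pos + 1) m = bsum L s t pos (m + 1) - 1 := by
        intro m
        rw [bsum_cons, ← htok, hs]
        simp [balTok]
      have hnest := ih (i0 - 2) (by omega) f (pos + 1) (by omega) (by omega)
        (by have : ((i0 : Int) - 2) ≤ (j : Int) - 1 := by omega
            omega)
        (by rw [hshift]
            have : (i0 - 2) + 1 = i0 - 1 := by omega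
            rw [this]
            have : (i0 - 1) + 1 = i0 := by omega
            have h' : bsum L s t pos ((i0-1)+1) = bsum L s t pos i0 := by rw [this]
            omega)
        (by intro m hm
            rw [hshift]
            have := hFge2 (m + 1) (by omega) (by omega)
            omega)
      rw [hnest]
      dsimp only [Option.bind]
      -- continue after the nested paragraph's end
      have hcast : pos + 1 + ((i0 - 2 : Nat) : Int) + 1 = pos + ((i0 : Nat) : Int) := by
        omega
      rw [hcast]
      have hbsum_i0 : bsum L s t pos i0 = 0 := by omega
      have hcont := ih (j - i0) (by omega) f (pos + (i0 : Int)) (by omega)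
        (by omega)
        (by omega)
        (by have hadd := bsum_add L s t i0 ((j - i0) + 1) pos
            have heq : i0 + ((j - i0) + 1) = j + 1 := by omega
            rw [heq] at hadd
            rw [hadd, hbsum_i0] at h3
            omega)
        (by intro m hm
            have hadd := bsum_add L s t i0 m pos
            have := h4 (i0 + m) (by omega)
            rw [hadd, hbsum_i0] at this
            omega)
      rw [hcont]
      congr 1
      omega
    · -- irrelevant token: step over it
      rw [if_neg hs]
      have hb1 : bsum L s t pos 1 = 0 := by
        rw [bsum_cons, ← htok]
        simp [balTok, hs, ht, bsum]
      have hshift : ∀ m : Nat, bsum L s t (pos + 1) m = bsum L s t pos (m + 1) := by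
        intro m
        rw [bsum_cons, ← htok]
        simp [balTok, hs, ht]
      have hj1 : 1 ≤ j := by
        by_contra h
        have : j = 0 := by omega
        rw [this, hb1] at h3; omega
      have hrec := ih (j - 1) (by omega) f (pos + 1) (by omega) (by omega)
        (by omega)
        (by rw [hshift]
            have : (j - 1) + 1 = j := by omega
            rw [this]
            have h' : bsum L s t pos (j + 1) = bsum L s t pos (j+1) := rfl
            omega)
        (by intro m hm
            rw [hshift]
            exact h4 (m + 1) (by omega))
      rw [hrec]
      congr 1
      omega

theorem readParagraph_agree (L : List String) (c : Int) (s t : String)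
    (h1 : -(L.length : Int) ≤ c) (h2 : c < (L.length : Int))
    (h3 : PySem.List.pyGetD L c "" ≠ s ∨
      ∃ k : Nat, k < 2 * L.length ∧ c + k < (L.length : Int) ∧
        1 + bsum L s t (c + 1) k = 0) :
    readParagraph_py L c s t = readParagraph_py_alt L c s t := by
  have hget := pyGet?_eq_some_pyGetD L c h1 h2
  unfold readParagraph_py readParagraph_py_alt
  rw [hget]
  dsimp only
  by_cases hs : PySem.List.pyGetD L c "" = s
  · rw [if_neg (by simpa using hs), if_pos (by rw [hs])]
    have hQ : ∃ k : Nat, c + k < (L.length : Int) ∧ 1 + bsum L s t (c + 1) k = 0 := by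
      rcases h3 with h | ⟨k, _, hk1, hk2⟩
      · exact absurd hs h
      · exact ⟨k, hk1, hk2⟩
    have hst : s ≠ t := by
      rintro rfl
      obtain ⟨k, _, hk⟩ := hQ
      have := bsum_nonneg_of_eq L s k (c + 1)
      omega
    classical
    set k0 := Nat.find hQ with hk0
    obtain ⟨hk0hi, hk0sum⟩ := Nat.find_spec hQ
    rw [← hk0] at hk0hi hk0sum
    have hne : ∀ m : Nat, m < k0 → 1 + bsum L s t (c + 1) m ≠ 0 := by
      intro m hm hzero
      exact Nat.find_min hQ hm ⟨by omega, hzero⟩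
    have hpos : ∀ m : Nat, m < k0 → 0 < 1 + bsum L s t (c + 1) m := by
      intro m
      induction m with
      | zero => intro _; simp [bsum]
      | succ m ihm =>
        intro hm
        have hp := ihm (by omega)
        have hn := hne (m + 1) hm
        have hstep := bsum_succ_right L s t (c + 1) m
        have hb := balTok_bounds s t (PySem.List.pyGetD L (c + 1 + m) "")
        omega
    have hk01 : 1 ≤ k0 := by
      rcases Nat.eq_zero_or_pos k0 with h | h
      · exfalso; rw [h] at hk0sum; simp [bsum] at hk0sum
      · omega
    have hk0len : (k0 : Int) < 2 * L.length := by omega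
    have hA := loopA_eq L s t k0 (2 * L.length + 2) c 1
      (by omega) (by omega) hk0hi (by omega) (fun m hm => hpos m hm)
    have hB := scanB_eq L s t hst (k0 - 1) (2 * L.length + 2) (c + 1)
      (by omega) (by omega)
      (by omega)
      (by have h : (k0 - 1) + 1 = k0 := by omega
          rw [h]; exact hk0sum)
      (by intro m hm; exact hpos m (by omega))
    rw [hA, hB]
    simp only [Option.getD_some]
    omega
  · rw [if_pos (by simpa using hs), if_neg (by simp [hs])]

-- ===== VERDICT (by name: the statement is the Claim_ definition above) =====
theorem readParagraph_py_spec : Claim_equal_readParagraph_py := by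
  intro lstFile currentPos paragraphStart paragraphStop _ hpre
  obtain ⟨h1, h2, h3⟩ := hpre
  unfold Spec_readParagraph_py
  exact readParagraph_agree lstFile currentPos paragraphStart paragraphStop h1 h2 h3
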